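-- pv_equiv track=rewrite | github.com/haiyen040602/dess-repro | Codebase/convert_cameracoque_training_format.py | find_token_indices
-- ===== SOURCE A (Python) =====
-- def find_token_indices(tokens, target_text):
--     """Find token indices for a given text (may be multiple tokens)"""
--     target_tokens = target_text.split()
--     indices = []
--
--     for i in range(len(tokens) - len(target_tokens) + 1):
--         if tokens[i:i+len(target_tokens)] == target_tokens:
--             indices.extend(range(i, i + len(target_tokens)))
--             return indices
--
--     # If exact match fails, try fuzzy match
--     for i, token in enumerate(tokens):
--         if target_text.lower() in token.lower() or token.lower() in target_text.lower():
--             return [i]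
--
--     return []
-- ===== SOURCE B (Python) =====
-- def find_token_indices(tokens, target_text):
--     """Find token indices for a given text (may be multiple tokens)"""
--     p = target_text.split()
--     m = len(p)
--     if m == 0:
--         return []
--     # Morris-Pratt: longest-proper-border table for the token pattern
--     fail = [max((k for k in range(q) if p[q - k:q] == p[:k]), default=0)
--             for q in range(m)]
--     # single left-to-right pass; q = length of the longest pattern prefix
--     # that is a suffix of the tokens read so far
--     q = 0
--     for j, tok in enumerate(tokens):
--         while q > 0 and p[q] != tok:
--             q = fail[q]
--         if p[q] == tok:
--             q += 1
--             if q == m: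
--                 start = j + 1 - m
--                 return list(range(start, start + m))
--         else:
--             q = 0
--     # fuzzy fallback, lowering the target once
--     low = target_text.lower()
--     for i, tok in enumerate(tokens):
--         t = tok.lower()
--         if low in t or t in low:
--             return [i]
--     return []
-- ===== Notes on version B (the rewrite author's own statement) =====
-- stated objective: faster
-- what changed: B replaces A's slide-a-window-and-compare scan with a Morris-Pratt matcher: it precomputes a border (failure) table for the target tokens and then makes one left-to-right pass over the tokens maintaining the length of the longest target prefix that is a suffix of the tokens read, so no token window is ever sliced or re-compared; the fuzzy fallback is unchanged except that it lowers the target once.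
import Mathlib
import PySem

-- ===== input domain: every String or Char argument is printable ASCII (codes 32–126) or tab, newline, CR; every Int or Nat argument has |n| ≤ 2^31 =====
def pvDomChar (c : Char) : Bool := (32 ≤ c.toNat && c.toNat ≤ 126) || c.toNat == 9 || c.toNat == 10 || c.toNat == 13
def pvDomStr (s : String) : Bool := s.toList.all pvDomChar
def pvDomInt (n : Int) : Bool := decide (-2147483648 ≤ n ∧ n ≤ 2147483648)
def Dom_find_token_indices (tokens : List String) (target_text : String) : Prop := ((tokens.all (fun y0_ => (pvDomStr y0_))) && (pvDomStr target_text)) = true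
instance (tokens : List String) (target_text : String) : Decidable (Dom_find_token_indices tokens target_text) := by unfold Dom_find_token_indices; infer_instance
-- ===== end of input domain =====

-- B replaces A's slide-and-compare window scan with a Morris-Pratt matcher (border table for
-- the target tokens, then one left-to-right pass over the tokens); the fuzzy fallback is kept.

-- ===== PORT A =====
def find_token_indices (tokens : List String) (target_text : String) : List Int :=
  let target_tokens := PySem.Str.split₀ target_text
  -- for i in range(len(tokens) - len(target_tokens) + 1): if tokens[i:i+len(target_tokens)] == target_tokens: return list(range(i, i+len(target_tokens)))
  match (PySem.List.pyRange 0 ((tokens.length : Int) - (target_tokens.length : Int) + 1) 1).find?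
      (fun i => PySem.List.slice tokens (some i) (some (i + (target_tokens.length : Int))) == target_tokens) with
  | some i => PySem.List.pyRange i (i + (target_tokens.length : Int)) 1
  | none =>
    -- for i, token in enumerate(tokens): if target_text.lower() in token.lower() or token.lower() in target_text.lower(): return [i]
    match (PySem.List.enumerate tokens 0).find?
        (fun p => PySem.Str.isIn (PySem.Str.lower target_text) (PySem.Str.lower p.2)
               || PySem.Str.isIn (PySem.Str.lower p.2) (PySem.Str.lower target_text)) with
    | some p => [p.1]
    | none => []

-- ===== PORT B =====
-- fail[q] = max(k for k in range(q) if p[q-k:q] == p[:k]) (default 0): longest proper border of p[:q].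
-- All loop counters of Source B are nonnegative, so they are carried as Nat.
def pvBorderCalc (p : List String) (q : Nat) : Nat :=
  ((List.range q).filter (fun k =>
      PySem.List.slice p (some ((q - k : Nat) : Int)) (some ((q : Nat) : Int))
        == PySem.List.slice p none (some ((k : Nat) : Int)))).foldl max 0

-- while q > 0 and p[q] != tok: q = fail[q]   (fuel only makes the loop total; it never runs out,
-- the state q strictly decreases and the loop starts with fuel = q)
def pvWhile (p : List String) (fl : List Nat) (tok : String) : Nat → Nat → Nat
  | 0, q => q
  | fuel + 1, q =>
    if 0 < q ∧ p.getD q "" ≠ tok then pvWhile p fl tok fuel (fl.getD q 0) else q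

-- for j, tok in enumerate(tokens): … returns the start index of the first exact match, if any
def pvScanB (p : List String) (fl : List Nat) (m : Nat) : List String → Nat → Nat → Option Int
  | [], _, _ => none
  | tok :: rest, j, q =>
    let q1 := pvWhile p fl tok q q
    if p.getD q1 "" == tok then
      if q1 + 1 = m then some ((j : Int) + 1 - (m : Int))
      else pvScanB p fl m rest (j + 1) (q1 + 1)
    else pvScanB p fl m rest (j + 1) 0

def find_token_indices_alt (tokens : List String) (target_text : String) : List Int :=
  match PySem.Str.split₀ target_text with
  | [] => []
  | head :: rest =>
    let p := head :: rest
    let m := p.length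
    let fl := (List.range m).map (pvBorderCalc p)
    match pvScanB p fl m tokens 0 0 with
    | some start => PySem.List.pyRange start (start + (m : Int)) 1
    | none =>
      -- fuzzy fallback, lowering the target once
      let low := PySem.Str.lower target_text
      match (PySem.List.enumerate tokens 0).find?
          (fun pr => PySem.Str.isIn low (PySem.Str.lower pr.2)
                  || PySem.Str.isIn (PySem.Str.lower pr.2) low) with
      | some pr => [pr.1]
      | none => []

-- ===== PRECONDITION & SPEC =====
def Spec_find_token_indices (tokens : List String) (target_text : String) (out : List Int) : Prop := out = find_token_indices_alt tokens target_text
instance (tokens : List String) (target_text : String) (out : List Int) : Decidable (Spec_find_token_indices tokens target_text out) := by unfold Spec_find_token_indices; infer_instance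

-- ===== CLAIM (what is proved, stated in full; the proofs are below) =====
def Claim_equal_find_token_indices : Prop := ∀ (tokens : List String) (target_text : String), Dom_find_token_indices tokens target_text → Spec_find_token_indices tokens target_text (find_token_indices tokens target_text)

-- ===== LEMMAS AND PROOFS =====

/-- Reference scan: first absolute index whose suffix (head `x`, tail `xs`) satisfies `P`. -/
def pvScan (P : String → List String → Bool) : List String → Int → Option Int
  | [], _ => none
  | x :: xs, i => if P x xs then some i else pvScan P xs (i + 1)

lemma pvScan_congr (P Q : String → List String → Bool) (h : ∀ x xs, P x xs = Q x xs) :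
    ∀ (xs : List String) (i : Int), pvScan P xs i = pvScan Q xs i := by
  intro xs
  induction xs with
  | nil => intro i; rfl
  | cons x xs ih => intro i; simp [pvScan, h, ih]

lemma pvFind?_congr_mem {α : Type} (l : List α) (p q : α → Bool) (h : ∀ a ∈ l, p a = q a) :
    l.find? p = l.find? q := by
  induction l with
  | nil => rfl
  | cons x xs ih =>
    have hx := h x (by simp)
    by_cases hp : p x = true
    · rw [List.find?_cons_of_pos hp, List.find?_cons_of_pos (by rw [← hx]; exact hp)]
    · rw [List.find?_cons_of_neg hp, List.find?_cons_of_neg (by rw [← hx]; exact hp)]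
      exact ih (fun a ha => h a (by simp [ha]))

/-- A's full-window test, as a predicate on the suffix at the scanned position. -/
def pvPredA (head : String) (rest : List String) (suf : List String) : Bool :=
  match suf with
  | [] => false
  | x :: t => x == head && (t.take rest.length == rest)

/-- A window starting past `n - k` can never equal the length-`k` target. -/
lemma pvSlice_len_ne (tokens : List String) (head : String) (rest : List String) (i : Int)
    (h0 : 0 ≤ i) (hgt : (tokens.length : Int) - ((head :: rest).length : Int) < i) :
    (PySem.List.slice tokens (some i) (some (i + ((head :: rest).length : Int))) == head :: rest) = false := by
  rw [PySem.List.slice_toNat _ h0 (by simp only [List.length_cons]; push_cast; omega)]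
  rw [beq_eq_false_iff_ne]
  intro e
  have hlen := congrArg List.length e
  simp only [List.length_take, List.length_drop, List.length_cons] at hlen
  simp only [List.length_cons] at hgt
  omega

/-- The window at `i` matches the whole target iff its head matches and the tail window matches. -/
lemma pvSlice_split (tokens : List String) (head : String) (rest : List String) (i : Int)
    (h0 : 0 ≤ i) (hn : i < (tokens.length : Int)) :
    (PySem.List.slice tokens (some i) (some (i + ((head :: rest).length : Int))) == head :: rest)
      = ((tokens[i.toNat]'(by omega) == head) && ((tokens.drop (i.toNat + 1)).take rest.length == rest)) := by
  rw [PySem.List.slice_toNat _ h0 (by simp only [List.length_cons]; push_cast; omega)]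
  have hk : (i + ((head :: rest).length : Int)).toNat - i.toNat = rest.length + 1 := by
    simp only [List.length_cons]; omega
  rw [hk, List.drop_eq_getElem_cons (show i.toNat < tokens.length by omega)]
  simp only [List.take_succ_cons, List.cons_beq_cons]

/-- A's index loop, read over suffixes, is the reference scan. -/
lemma pvRange_find_eq_scan (P : List String → Bool) :
    ∀ (xs : List String) (s : Int),
      (PySem.List.pyRange s (s + (xs.length : Int)) 1).find? (fun i => P (xs.drop (i - s).toNat))
        = pvScan (fun x t => P (x :: t)) xs s := by
  intro xs
  induction xs with
  | nil => intro s; simp [PySem.List.pyRange_one_eq_nil, pvScan]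
  | cons x xs ih =>
    intro s
    rw [PySem.List.pyRange_one_cons (by simp only [List.length_cons]; push_cast; omega)]
    simp only [List.find?_cons]
    have hdrop0 : ((x :: xs).drop (s - s).toNat) = x :: xs := by simp
    by_cases hP : P (x :: xs) = true
    · simp [hP, pvScan]
    · rw [show (s + ((x :: xs).length : Int)) = (s + 1) + ((xs.length : Int)) by
        simp only [List.length_cons]; push_cast; ring]
      have hcongr : (PySem.List.pyRange (s + 1) ((s + 1) + (xs.length : Int)) 1).find?
            (fun i => P ((x :: xs).drop (i - s).toNat))
          = (PySem.List.pyRange (s + 1) ((s + 1) + (xs.length : Int)) 1).find?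
            (fun i => P (xs.drop (i - (s + 1)).toNat)) := by
        apply pvFind?_congr_mem
        intro a ha
        rw [PySem.List.mem_pyRange_one] at ha
        have h1 : (a - s).toNat = (a - (s + 1)).toNat + 1 := by omega
        simp [h1]
      simp only [hdrop0, hP, pvScan]
      simp only [Bool.false_eq_true, if_false]
      rw [hcongr, ih]

/-- A's exact phase equals the canonical scan. -/
lemma pvA_exact (tokens : List String) (head : String) (rest : List String) :
    (PySem.List.pyRange 0 ((tokens.length : Int) - ((head :: rest).length : Int) + 1) 1).find?
        (fun i => PySem.List.slice tokens (some i) (some (i + ((head :: rest).length : Int))) == head :: rest)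
      = pvScan (fun x t => x == head && (t.take rest.length == rest)) tokens 0 := by
  have hfull :
      (PySem.List.pyRange 0 ((tokens.length : Int) - ((head :: rest).length : Int) + 1) 1).find?
          (fun i => PySem.List.slice tokens (some i) (some (i + ((head :: rest).length : Int))) == head :: rest)
        = (PySem.List.pyRange 0 (0 + (tokens.length : Int)) 1).find?
          (fun i => PySem.List.slice tokens (some i) (some (i + ((head :: rest).length : Int))) == head :: rest) := by
    rcases le_or_gt ((head :: rest).length : Int) (tokens.length : Int) with hle | hlt
    · rw [PySem.List.pyRange_one_append 0 ((tokens.length : Int) - ((head :: rest).length : Int) + 1)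
        (0 + (tokens.length : Int)) (by simp only [List.length_cons] at *; push_cast at *; omega)
        (by simp only [List.length_cons] at *; push_cast at *; omega)]
      rw [List.find?_append]
      have hnone : (PySem.List.pyRange ((tokens.length : Int) - ((head :: rest).length : Int) + 1)
            (0 + (tokens.length : Int)) 1).find?
            (fun i => PySem.List.slice tokens (some i) (some (i + ((head :: rest).length : Int))) == head :: rest)
          = none := by
        apply List.find?_eq_none.mpr
        intro a ha
        rw [PySem.List.mem_pyRange_one] at ha
        simp only [Bool.not_eq_true]
        exact pvSlice_len_ne tokens head rest a
          (by simp only [List.length_cons] at *; push_cast at *; omega)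
          (by omega)
      rw [hnone, Option.or_none]
    · rw [PySem.List.pyRange_one_eq_nil (by omega)]
      symm
      apply List.find?_eq_none.mpr
      intro a ha
      rw [PySem.List.mem_pyRange_one] at ha
      simp only [Bool.not_eq_true]
      exact pvSlice_len_ne tokens head rest a (by omega) (by omega)
  rw [hfull]
  have hcongr :
      (PySem.List.pyRange 0 (0 + (tokens.length : Int)) 1).find?
          (fun i => PySem.List.slice tokens (some i) (some (i + ((head :: rest).length : Int))) == head :: rest)
        = (PySem.List.pyRange 0 (0 + (tokens.length : Int)) 1).find?
          (fun i => pvPredA head rest (tokens.drop (i - 0).toNat)) := by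
    apply pvFind?_congr_mem
    intro a ha
    rw [PySem.List.mem_pyRange_one] at ha
    have hlt : a.toNat < tokens.length := by omega
    rw [pvSlice_split tokens head rest a (by omega) (by omega), sub_zero,
      List.drop_eq_getElem_cons hlt]
    rfl
  rw [hcongr, pvRange_find_eq_scan (pvPredA head rest) tokens 0]
  exact pvScan_congr _ _ (fun x t => rfl) tokens 0

/-- A's window test at a position is exactly "the target is a prefix of the suffix there". -/
lemma pvPredA_eq_prefix (head x : String) (rest t : List String) :
    (x == head && (t.take rest.length == rest)) = decide ((head :: rest) <+: (x :: t)) := by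
  rcases eq_or_ne x head with h1 | h1
  · rcases eq_or_ne (t.take rest.length) rest with h2 | h2
    · subst h1
      simp [List.prefix_iff_eq_take, h2]
    · subst h1
      simp [List.prefix_iff_eq_take, h2, Ne.symm h2]
  · simp [List.cons_prefix_cons, h1, Ne.symm h1]

/-- `pvScan` returns `none` when no position satisfies the predicate. -/
lemma pvScan_eq_none (P : String → List String → Bool) :
    ∀ (xs : List String) (i : Int),
      (∀ (k : Nat) (hk : k < xs.length), P (xs[k]'hk) (xs.drop (k + 1)) = false) →
      pvScan P xs i = none := by
  intro xs
  induction xs with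
  | nil => intro i h; rfl
  | cons x xs ih =>
    intro i h
    have h0 := h 0 (by simp)
    simp only [List.getElem_cons_zero, List.drop_succ_cons, List.drop_zero] at h0
    simp only [pvScan, h0, Bool.false_eq_true, if_false]
    exact ih (i + 1) (fun k hk => by
      have := h (k + 1) (by simpa using Nat.succ_lt_succ hk)
      simpa using this)

/-- `pvScan` returns the first index satisfying the predicate. -/
lemma pvScan_eq_some (P : String → List String → Bool) :
    ∀ (xs : List String) (i : Int) (k : Nat) (hk : k < xs.length),
      P (xs[k]'hk) (xs.drop (k + 1)) = true →
      (∀ (k' : Nat) (h' : k' < k), P (xs[k']'(by omega)) (xs.drop (k' + 1)) = false) →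
      pvScan P xs i = some (i + (k : Int)) := by
  intro xs
  induction xs with
  | nil => intro i k hk; simp at hk
  | cons x xs ih =>
    intro i k hk hP hmin
    cases k with
    | zero =>
      simp only [List.getElem_cons_zero, List.drop_succ_cons, List.drop_zero] at hP
      simp [pvScan, hP]
    | succ k =>
      have h0 := hmin 0 (Nat.succ_pos k)
      simp only [List.getElem_cons_zero, List.drop_succ_cons, List.drop_zero] at h0
      simp only [pvScan, h0, Bool.false_eq_true, if_false]
      rw [ih (i + 1) k (by simpa using hk) (by simpa using hP)
        (fun k' h' => by have := hmin (k' + 1) (by omega); simpa using this)]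
      congr 1
      push_cast
      ring

/-- Longest prefix of `p` (up to all of it) that is a suffix of `t`. -/
def pvLps (p t : List String) : Nat := Nat.findGreatest (fun k => p.take k <:+ t) p.length

lemma pvLps_le (p t : List String) : pvLps p t ≤ p.length := Nat.findGreatest_le _

lemma pvLps_suffix (p t : List String) : p.take (pvLps p t) <:+ t := by
  have h0 : p.take 0 <:+ t := by rw [List.take_zero]; exact t.nil_suffix
  unfold pvLps
  exact Nat.findGreatest_spec (P := fun k => p.take k <:+ t) (n := p.length) (Nat.zero_le _) h0

lemma pvLps_ge (p t : List String) (k : Nat) (hk : k ≤ p.length) (hs : p.take k <:+ t) :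
    k ≤ pvLps p t := Nat.le_findGreatest hk hs

lemma pvLps_nil (p : List String) (_hp : 0 < p.length) : pvLps p [] = 0 := by
  apply Nat.findGreatest_eq_zero_iff.mpr
  intro n hn hnle hsuf
  rw [List.suffix_nil] at hsuf
  have := congrArg List.length hsuf
  simp only [List.length_take, List.length_nil] at this
  omega

/-- The border-table entry test is exactly "p[:k] is a suffix of p[:q]". -/
lemma pvBorderPred_iff (p : List String) (q k : Nat) (hk : k < q) (hq : q ≤ p.length) :
    ((p.drop (q - k)).take k = p.take k) ↔ p.take k <:+ p.take q := by
  have hdt : (p.take q).drop (q - k) = (p.drop (q - k)).take k := by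
    rw [List.drop_take]
    congr 1
    omega
  constructor
  · intro he
    rw [← he, ← hdt]
    exact List.drop_suffix _ _
  · intro hs
    have hsd : (p.take q).drop (q - k) <:+ p.take q := List.drop_suffix _ _
    have hlen1 : (p.take k).length = k := by
      rw [List.length_take]; omega
    have hlen2 : ((p.take q).drop (q - k)).length = k := by
      rw [List.length_drop, List.length_take]; omega
    have := List.suffix_of_suffix_length_le hs hsd (by omega)
    have heq := List.IsSuffix.eq_of_length this (by omega)
    rw [← hdt, ← heq]

lemma pvFoldlMax_mem (l : List Nat) (a : Nat) : l.foldl max a = a ∨ l.foldl max a ∈ l := by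
  induction l generalizing a with
  | nil => exact Or.inl rfl
  | cons x xs ih =>
    simp only [List.foldl_cons]
    rcases ih (max a x) with h | h
    · rcases max_choice a x with hm | hm
      · exact Or.inl (by rw [h, hm])
      · exact Or.inr (by rw [h, hm]; simp)
    · exact Or.inr (by simp [h])

lemma pvBorder_lt (p : List String) (q : Nat) (hq : 0 < q) : pvBorderCalc p q < q := by
  rcases pvFoldlMax_mem ((List.range q).filter (fun k =>
      PySem.List.slice p (some ((q - k : Nat) : Int)) (some ((q : Nat) : Int))
        == PySem.List.slice p none (some ((k : Nat) : Int)))) 0 with h | h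
  · rw [pvBorderCalc, h]; exact hq
  · rw [pvBorderCalc]
    have := List.mem_range.mp (List.mem_of_mem_filter h)
    exact this

lemma pvBorder_suffix (p : List String) (q : Nat) (hq : q ≤ p.length) :
    p.take (pvBorderCalc p q) <:+ p.take q := by
  rcases pvFoldlMax_mem ((List.range q).filter (fun k =>
      PySem.List.slice p (some ((q - k : Nat) : Int)) (some ((q : Nat) : Int))
        == PySem.List.slice p none (some ((k : Nat) : Int)))) 0 with h | h
  · rw [pvBorderCalc, h]
    simp
  · rw [pvBorderCalc]
    set b := ((List.range q).filter (fun k =>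
      PySem.List.slice p (some ((q - k : Nat) : Int)) (some ((q : Nat) : Int))
        == PySem.List.slice p none (some ((k : Nat) : Int)))).foldl max 0 with hb
    have hmem := List.mem_filter.mp h
    have hlt : b < q := List.mem_range.mp hmem.1
    have hpred := hmem.2
    have h2 : q - (q - b) = b := by omega
    rw [PySem.List.slice_natCast, PySem.List.slice_to_natCast, beq_iff_eq, h2] at hpred
    exact (pvBorderPred_iff p q b hlt hq).mp hpred

lemma pvBorder_ge (p : List String) (q k : Nat) (hk : k < q) (hq : q ≤ p.length)
    (hs : p.take k <:+ p.take q) : k ≤ pvBorderCalc p q := by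
  rw [pvBorderCalc]
  apply (PySem.List.le_foldl_max _ 0).2
  apply List.mem_filter.mpr
  refine ⟨List.mem_range.mpr hk, ?_⟩
  have h1 : q - (q - k) = k := by omega
  rw [PySem.List.slice_natCast, PySem.List.slice_to_natCast, beq_iff_eq, h1]
  exact (pvBorderPred_iff p q k hk hq).mpr hs

/-- Extending a suffix match by one token. -/
lemma pvTakeSucc_suffix_iff (p : List String) (k : Nat) (hk : k < p.length)
    (t : List String) (a : String) :
    p.take (k + 1) <:+ t ++ [a] ↔ (p.take k <:+ t ∧ p[k] = a) := by
  rw [List.take_succ_eq_append_getElem hk, ← List.reverse_prefix]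
  simp only [List.reverse_append, List.reverse_singleton, List.singleton_append,
    List.cons_prefix_cons, List.reverse_prefix]
  tauto

lemma pvFl_getD (p : List String) (m q : Nat) (h : q < m) :
    ((List.range m).map (pvBorderCalc p)).getD q 0 = pvBorderCalc p q := by
  rw [List.getD_eq_getElem _ _ (by simpa using h)]
  simp

/-- The while loop lands on the largest viable prefix length whose next token can be `a`. -/
lemma pvWhile_spec (p t : List String) (a : String) (fuel q : Nat)
    (hfuel : q ≤ fuel) (hqm : q < p.length) (hsuf : p.take q <:+ t)
    (hskip : ∀ k, k < p.length → p.take k <:+ t → q < k → p.getD k "" ≠ a) :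
    (pvWhile p ((List.range p.length).map (pvBorderCalc p)) a fuel q < p.length) ∧
    (p.take (pvWhile p ((List.range p.length).map (pvBorderCalc p)) a fuel q) <:+ t) ∧
    (∀ k, k < p.length → p.take k <:+ t →
      pvWhile p ((List.range p.length).map (pvBorderCalc p)) a fuel q < k → p.getD k "" ≠ a) ∧
    (pvWhile p ((List.range p.length).map (pvBorderCalc p)) a fuel q = 0 ∨
      p.getD (pvWhile p ((List.range p.length).map (pvBorderCalc p)) a fuel q) "" = a) := by
  induction fuel generalizing q with
  | zero =>
    have hq0 : q = 0 := by omega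
    subst hq0
    exact ⟨hqm, hsuf, hskip, Or.inl rfl⟩
  | succ fuel ih =>
    by_cases hc : 0 < q ∧ p.getD q "" ≠ a
    · rw [show pvWhile p ((List.range p.length).map (pvBorderCalc p)) a (fuel + 1) q
          = pvWhile p ((List.range p.length).map (pvBorderCalc p)) a fuel
              (((List.range p.length).map (pvBorderCalc p)).getD q 0) from by
        simp only [pvWhile, if_pos hc]]
      rw [pvFl_getD p p.length q hqm]
      have hblt : pvBorderCalc p q < q := pvBorder_lt p q hc.1
      apply ih
      · omega
      · omega
      · exact (pvBorder_suffix p q hqm.le).trans hsuf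
      · intro k hkm hks hgt
        rcases lt_trichotomy k q with hlt | heq | hgtq
        · exfalso
          have hkq : p.take k <:+ p.take q := by
            apply List.suffix_of_suffix_length_le hks hsuf
            rw [List.length_take, List.length_take]
            omega
          have := pvBorder_ge p q k hlt hqm.le hkq
          omega
        · subst heq; exact hc.2
        · exact hskip k hkm hks hgtq
    · rw [show pvWhile p ((List.range p.length).map (pvBorderCalc p)) a (fuel + 1) q = q from by
        simp only [pvWhile, if_neg hc]]
      refine ⟨hqm, hsuf, hskip, ?_⟩
      by_cases h0 : q = 0
      · exact Or.inl h0
      · right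
        by_contra hne
        exact hc ⟨by omega, hne⟩

/-- After the while loop and the compare, the new state is the longest prefix-suffix of `t ++ [a]`. -/
lemma pvStep_lps (p t : List String) (a : String) (r : Nat)
    (hr : r < p.length) (hsuf : p.take r <:+ t)
    (hskip : ∀ k, k < p.length → p.take k <:+ t → r < k → p.getD k "" ≠ a)
    (hexit : r = 0 ∨ p.getD r "" = a) :
    pvLps p (t ++ [a]) = (if p.getD r "" == a then r + 1 else 0) := by
  by_cases hb : p.getD r "" = a
  · rw [if_pos (beq_iff_eq.mpr hb)]
    rw [List.getD_eq_getElem p "" hr] at hb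
    unfold pvLps
    apply Nat.findGreatest_eq_iff.mpr
    refine ⟨by omega, fun _ => ?_, fun n hn1 hn2 hsn => ?_⟩
    · exact (pvTakeSucc_suffix_iff p r hr t a).mpr ⟨hsuf, hb⟩
    · obtain ⟨n, rfl⟩ : ∃ n', n = n' + 1 := ⟨n - 1, by omega⟩
      have hnlt : n < p.length := by omega
      obtain ⟨h1, h2⟩ := (pvTakeSucc_suffix_iff p n hnlt t a).mp hsn
      exact hskip n hnlt h1 (by omega) (by rw [List.getD_eq_getElem p "" hnlt]; exact h2)
  · rw [if_neg (by simpa using hb)]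
    have hr0 : r = 0 := by
      rcases hexit with h | h
      · exact h
      · exact absurd h hb
    subst hr0
    unfold pvLps
    apply Nat.findGreatest_eq_zero_iff.mpr
    intro n hn1 hn2 hsn
    obtain ⟨n, rfl⟩ : ∃ n', n = n' + 1 := ⟨n - 1, by omega⟩
    have hnlt : n < p.length := by omega
    obtain ⟨h1, h2⟩ := (pvTakeSucc_suffix_iff p n hnlt t a).mp hsn
    rcases Nat.eq_zero_or_pos n with h0 | h0
    · subst h0
      exact hb (by rw [List.getD_eq_getElem p "" hnlt]; exact h2)
    · exact hskip n hnlt h1 h0 (by rw [List.getD_eq_getElem p "" hnlt]; exact h2)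

/-- If the pattern matches at `s` inside the first `s+m` places, its end is a prefix-suffix of length `m`. -/
lemma pvMatch_take (p xs : List String) (s : Nat) (h : p <+: xs.drop s) :
    xs.take (s + p.length) = xs.take s ++ p := by
  obtain ⟨w, hw⟩ := h
  rw [List.take_add, ← hw, List.take_left' rfl]

/-- B's Morris-Pratt pass returns exactly the first exact-match start of the reference scan. -/
lemma pvScanB_spec (p : List String) (hp : 0 < p.length) :
    ∀ (rem t : List String) (q : Nat),
      q = pvLps p t → q < p.length →
      (∀ s : Nat, s + p.length ≤ t.length → ¬ p <+: (t ++ rem).drop s) →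
      pvScanB p ((List.range p.length).map (pvBorderCalc p)) p.length rem t.length q
        = pvScan (fun x t' => decide (p <+: x :: t')) (t ++ rem) 0 := by
  intro rem
  induction rem with
  | nil =>
    intro t q hq hqm hinv
    rw [List.append_nil]
    rw [show pvScanB p ((List.range p.length).map (pvBorderCalc p)) p.length [] t.length q
        = none from rfl]
    symm
    apply pvScan_eq_none
    intro k hk
    rw [← List.drop_eq_getElem_cons hk]
    simp only [decide_eq_false_iff_not]
    intro hpre
    have hlen := hpre.length_le
    rw [List.length_drop] at hlen
    exact hinv k (by omega) (by rw [List.append_nil]; exact hpre)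
  | cons a rem' ih =>
    intro t q hq hqm hinv
    obtain ⟨hrm, hrsuf, hrskip, hrexit⟩ :=
      pvWhile_spec p t a q q le_rfl hqm (hq ▸ pvLps_suffix p t)
        (fun k hkm hks hgt => by
          have := pvLps_ge p t k hkm.le hks
          omega)
    set r := pvWhile p ((List.range p.length).map (pvBorderCalc p)) a q q with hrdef
    have hstep := pvStep_lps p t a r hrm hrsuf hrskip hrexit
    have hxs : (t ++ [a]) ++ rem' = t ++ a :: rem' := by simp
    simp only [pvScanB, ← hrdef]
    by_cases hb : p.getD r "" = a
    · rw [if_pos (beq_iff_eq.mpr hb)]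
      rw [if_pos (beq_iff_eq.mpr hb)] at hstep
      by_cases hm : r + 1 = p.length
      · rw [if_pos hm]
        -- the first exact match ends here, at absolute start t.length + 1 - p.length
        have hsm : p <:+ t ++ [a] := by
          have h := pvLps_suffix p (t ++ [a])
          rwa [hstep, hm, List.take_length] at h
        have hmle : p.length ≤ t.length + 1 := by
          have := hsm.length_le
          simpa using this
        obtain ⟨u, hu⟩ := hsm
        have hulen : u.length = t.length + 1 - p.length := by
          have := congrArg List.length hu
          simp at this
          omega
        have hs0lt : t.length + 1 - p.length < (t ++ a :: rem').length := by
          simp only [List.length_append, List.length_cons]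
          omega
        rw [pvScan_eq_some (fun x t' => decide (p <+: x :: t')) (t ++ a :: rem') 0
          (t.length + 1 - p.length) hs0lt ?_ ?_]
        · congr 1
          omega
        · beta_reduce
          rw [← List.drop_eq_getElem_cons hs0lt]
          rw [← hxs, ← hu, ← hulen, List.append_assoc, List.drop_left]
          simp
        · intro k' h'
          beta_reduce
          rw [← List.drop_eq_getElem_cons (show k' < (t ++ a :: rem').length by omega)]
          simp only [decide_eq_false_iff_not]
          exact hinv k' (by omega)
      · rw [if_neg hm]
        have hlt : r + 1 < p.length := by
          have := pvLps_le p (t ++ [a])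
          omega
        have := ih (t ++ [a]) (r + 1) hstep.symm hlt ?_
        · rw [List.length_append, List.length_singleton] at this
          rw [this, hxs]
        · intro s hs hpre
          rw [hxs] at hpre
          rw [List.length_append, List.length_singleton] at hs
          rcases Nat.lt_or_ge (s + p.length) (t.length + 1) with hlt' | hge
          · exact hinv s (by omega) hpre
          · have hse : s + p.length = t.length + 1 := by omega
            have htake := pvMatch_take p (t ++ a :: rem') s hpre
            rw [hse] at htake
            have htl : (t ++ a :: rem').take (t.length + 1) = t ++ [a] := by
              rw [← hxs]
              exact List.take_left' (by simp)
            rw [htl] at htake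
            have hsuf2 : p <:+ t ++ [a] := ⟨(t ++ a :: rem').take s, htake.symm⟩
            have := pvLps_ge p (t ++ [a]) p.length le_rfl (by rw [List.take_length]; exact hsuf2)
            have := pvLps_le p (t ++ [a])
            omega
    · rw [if_neg (by simpa using hb)]
      rw [if_neg (by simpa using hb)] at hstep
      have := ih (t ++ [a]) 0 hstep.symm hp ?_
      · rw [List.length_append, List.length_singleton] at this
        rw [this, hxs]
      · intro s hs hpre
        rw [hxs] at hpre
        rw [List.length_append, List.length_singleton] at hs
        rcases Nat.lt_or_ge (s + p.length) (t.length + 1) with hlt' | hge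
        · exact hinv s (by omega) hpre
        · have hse : s + p.length = t.length + 1 := by omega
          have htake := pvMatch_take p (t ++ a :: rem') s hpre
          rw [hse] at htake
          have htl : (t ++ a :: rem').take (t.length + 1) = t ++ [a] := by
            rw [← hxs]
            exact List.take_left' (by simp)
          rw [htl] at htake
          have hsuf2 : p <:+ t ++ [a] := ⟨(t ++ a :: rem').take s, htake.symm⟩
          have := pvLps_ge p (t ++ [a]) p.length le_rfl (by rw [List.take_length]; exact hsuf2)
          omega

-- ===== VERDICT (by name: the statement is the Claim_ definition above) =====
theorem find_token_indices_spec : Claim_equal_find_token_indices := by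
  intro tokens target_text _
  unfold Spec_find_token_indices
  cases h : PySem.Str.split₀ target_text with
  | nil =>
    simp only [find_token_indices, find_token_indices_alt, h, List.length_nil, Nat.cast_zero]
    rw [show (tokens.length : Int) - 0 + 1 = (tokens.length : Int) + 1 by ring]
    rw [PySem.List.pyRange_one_cons (by omega)]
    rw [List.find?_cons_of_pos (by
      rw [show (0 : Int) + 0 = 0 by ring]
      rw [PySem.List.slice_toNat _ le_rfl le_rfl]
      simp)]
    norm_num [PySem.List.pyRange_one_eq_nil]
  | cons head rest =>
    simp only [find_token_indices, find_token_indices_alt, h]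
    rw [pvA_exact]
    rw [pvScan_congr _ _ (fun x t => pvPredA_eq_prefix head x rest t) tokens 0]
    have hB := pvScanB_spec (head :: rest) (by simp) tokens [] 0
      ((pvLps_nil (head :: rest) (by simp)).symm) (by simp)
      (fun s hs => by simp at hs)
    simp only [List.length_nil, List.nil_append] at hB
    rw [hB]
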